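-- pv_equiv track=rewrite | github.com/iliailmer/advent_of_code_2025 | day_3.py | find_max_pair
-- ===== SOURCE A (Python) =====
-- def find_max_pair(line: list[int]):
--     max_pair = 0
--     for i in range(len(line) - 1):
--         for j in range(i + 1, len(line)):
--             pair = line[i] * 10 + line[j]
--             if pair > max_pair:
--                 max_pair = pair
--     return max_pair
-- ===== SOURCE B (Python) =====
-- def find_max_pair(line: list[int]):
--     # One backward pass keeping the running maximum of the elements seen so
--     # far (the suffix maximum): the best pair starting at position i is
--     # 10*line[i] + max(line[i+1:]).
--     best = 0
--     suffix_max = None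
--     for x in reversed(line):
--         if suffix_max is not None:
--             cand = x * 10 + suffix_max
--             if cand > best:
--                 best = cand
--             if x > suffix_max:
--                 suffix_max = x
--         else:
--             suffix_max = x
--     return best
-- ===== Notes on version B (the rewrite author's own statement) =====
-- stated objective: faster
-- what changed: Replaces the quadratic double loop over all index pairs by a single backward pass that keeps the suffix maximum, combining each element with the maximum of the elements after it.
import Mathlib
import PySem

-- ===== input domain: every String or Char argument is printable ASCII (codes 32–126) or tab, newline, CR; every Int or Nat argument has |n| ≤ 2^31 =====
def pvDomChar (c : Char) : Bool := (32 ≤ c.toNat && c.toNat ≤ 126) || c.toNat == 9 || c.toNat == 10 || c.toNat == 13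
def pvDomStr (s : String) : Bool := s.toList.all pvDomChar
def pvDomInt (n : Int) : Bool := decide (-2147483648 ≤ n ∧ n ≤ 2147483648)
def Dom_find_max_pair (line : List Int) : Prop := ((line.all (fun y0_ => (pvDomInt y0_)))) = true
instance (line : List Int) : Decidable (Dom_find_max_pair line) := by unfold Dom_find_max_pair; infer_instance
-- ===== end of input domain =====

-- B replaces A's nested loops over all index pairs by a single backward pass
-- carrying a running suffix maximum (objective: faster).

-- ===== PORT A =====
-- literal port of A: nested index loops, best-so-far accumulator starting at 0
def find_max_pair (line : List Int) : Int :=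
  (PySem.List.pyRange 0 ((line.length : Int) - 1) 1).foldl
    (fun max_pair i =>
      (PySem.List.pyRange (i + 1) (line.length : Int) 1).foldl
        (fun max_pair j =>
          let pair := PySem.List.pyGetD line i 0 * 10 + PySem.List.pyGetD line j 0
          if pair > max_pair then pair else max_pair)
        max_pair)
    0

-- ===== PORT B =====
-- literal port of B: fold over the reversed list carrying (best, suffix_max)
def find_max_pair_alt (line : List Int) : Int :=
  (line.reverse.foldl
    (fun (st : Int × Option Int) x =>
      match st.2 with
      | some s =>
          let best := let cand := x * 10 + s; if cand > st.1 then cand else st.1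
          (best, some (if x > s then x else s))
      | none => (st.1, some x))
    ((0 : Int), (none : Option Int))).1

-- ===== PRECONDITION & SPEC =====
def Spec_find_max_pair (line : List Int) (out : Int) : Prop := out = find_max_pair_alt line
instance (line : List Int) (out : Int) : Decidable (Spec_find_max_pair line out) := by unfold Spec_find_max_pair; infer_instance

-- ===== CLAIM (what is proved, stated in full; the proofs are below) =====
def Claim_equal_find_max_pair : Prop := ∀ (line : List Int), Dom_find_max_pair line → Spec_find_max_pair line (find_max_pair line)

-- ===== LEMMAS AND PROOFS =====

-- one row of A's outer loop: fold the candidates of element c over the elements after it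
def pvRow (c : Int) (ys : List Int) (acc : Int) : Int :=
  ys.foldl (fun m y => if c * 10 + y > m then c * 10 + y else m) acc

-- A's algorithm in structural (per-head-row) form
def pvGo : List Int → Int → Int
  | [], acc => acc
  | x :: xs, acc => pvGo xs (pvRow x xs acc)

-- maximum of a list, none for []
def pvMaxE : List Int → Option Int
  | [] => none
  | x :: xs => some (xs.foldl max x)

-- B's fold step, named
def pvStep (st : Int × Option Int) (x : Int) : Int × Option Int :=
  match st.2 with
  | some s =>
      let best := let cand := x * 10 + s; if cand > st.1 then cand else st.1
      (best, some (if x > s then x else s))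
  | none => (st.1, some x)

lemma pvIf_max (a b : Int) : (if b > a then b else a) = max a b := by
  omega

lemma pvFoldlMax_comm (t : List Int) (a b : Int) :
    t.foldl max (max a b) = max (t.foldl max a) b := by
  induction t generalizing a b with
  | nil => simp
  | cons z t ih => simpa [max_right_comm] using ih (max a z) b

lemma pvRow_char (c : Int) (ys : List Int) (acc : Int) :
    pvRow c ys acc = match pvMaxE ys with
      | none => acc
      | some s => max acc (c * 10 + s) := by
  induction ys generalizing acc with
  | nil => rfl
  | cons y t ih =>
    show pvRow c t (if c * 10 + y > acc then c * 10 + y else acc) = _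
    rw [pvIf_max, ih]
    cases t with
    | nil => rfl
    | cons z t' =>
      show max (max acc (c * 10 + y)) (c * 10 + t'.foldl max z) =
        max acc (c * 10 + (z :: t').foldl max y)
      have : (z :: t').foldl max y = max (t'.foldl max z) y := by
        show t'.foldl max (max y z) = _
        rw [max_comm y z, pvFoldlMax_comm]
      rw [this, ← max_add_add_left, max_assoc, max_comm (c * 10 + y)]

lemma pvGo_max (l : List Int) (a b : Int) :
    pvGo l (max a b) = max (pvGo l a) b := by
  induction l generalizing a b with
  | nil => rfl
  | cons y t ih =>
    show pvGo t (pvRow y t (max a b)) = max (pvGo t (pvRow y t a)) b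
    rw [pvRow_char, pvRow_char]
    cases t with
    | nil => rfl
    | cons z t' =>
      simp only [pvMaxE]
      rw [max_right_comm]
      exact ih (max a (y * 10 + t'.foldl max z)) b

-- invariant of B's single pass: (best so far, suffix maximum)
lemma pvB_state (l : List Int) :
    l.reverse.foldl pvStep ((0 : Int), (none : Option Int)) = (pvGo l 0, pvMaxE l) := by
  induction l with
  | nil => rfl
  | cons x l ih =>
    rw [List.reverse_cons, List.foldl_append, ih]
    cases l with
    | nil => rfl
    | cons y t =>
      show pvStep (pvGo (y :: t) 0, some (t.foldl max y)) x = _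
      simp only [pvStep, pvIf_max]
      rw [Prod.mk.injEq]
      refine ⟨?_, ?_⟩
      · show max (pvGo (y :: t) 0) (x * 10 + t.foldl max y) = pvGo (y :: t) (pvRow x (y :: t) 0)
        rw [pvRow_char]
        simp only [pvMaxE]
        rw [← pvGo_max]
      · show some (max (t.foldl max y) x) = pvMaxE (x :: y :: t)
        simp only [pvMaxE]
        show _ = some (t.foldl max (max x y))
        rw [max_comm x y, pvFoldlMax_comm]

lemma pvShift (a b : Int) :
    PySem.List.pyRange (a + 1) (b + 1) = (PySem.List.pyRange a b).map (· + 1) := by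
  rw [PySem.List.pyRange_one, PySem.List.pyRange_one, List.map_map]
  rw [show b + 1 - (a + 1) = b - a by ring]
  congr 1
  funext k
  simp only [Function.comp]
  ring

lemma pvGetD_cons_succ (x : Int) (xs : List Int) (i : Int) (h : 0 ≤ i) :
    PySem.List.pyGetD (x :: xs) (i + 1) 0 = PySem.List.pyGetD xs i 0 := by
  obtain ⟨n, rfl⟩ := Int.eq_ofNat_of_zero_le h
  rw [show ((n : Int) + 1) = ((n + 1 : Nat) : Int) by push_cast; ring,
      PySem.List.pyGetD_natCast, PySem.List.pyGetD_natCast]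
  rfl

-- A's index loops, with a generalized accumulator, equal the structural form pvGo
lemma pvOuter (line : List Int) (acc : Int) :
    (PySem.List.pyRange 0 ((line.length : Int) - 1)).foldl
      (fun max_pair i =>
        (PySem.List.pyRange (i + 1) (line.length : Int)).foldl
          (fun max_pair j =>
            if PySem.List.pyGetD line i 0 * 10 + PySem.List.pyGetD line j 0 > max_pair
            then PySem.List.pyGetD line i 0 * 10 + PySem.List.pyGetD line j 0
            else max_pair) max_pair) acc
      = pvGo line acc := by
  induction line generalizing acc with
  | nil =>
    rw [PySem.List.pyRange_one_eq_nil (by norm_num)]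
    rfl
  | cons x xs ih =>
    cases xs with
    | nil =>
      rw [show (([x] : List Int).length : Int) - 1 = 0 by norm_num,
          PySem.List.pyRange_one_eq_nil le_rfl]
      rfl
    | cons y t =>
      have hlen : ((x :: y :: t).length : Int) - 1 = ((y :: t).length : Int) := by
        push_cast [List.length_cons]; ring
      rw [hlen, PySem.List.pyRange_one_cons (by exact_mod_cast Nat.succ_pos t.length),
          List.foldl_cons]
      rw [show ((((y :: t).length : Nat)) : Int) = (((y :: t).length : Int) - 1) + 1 by ring,
          pvShift 0 (((y :: t).length : Int) - 1), List.foldl_map]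
      have hcongr : ∀ (m : Int), ∀ i ∈ PySem.List.pyRange 0 (((y :: t).length : Int) - 1),
          (PySem.List.pyRange (i + 1 + 1) ((x :: y :: t).length : Int)).foldl
            (fun max_pair j =>
              if PySem.List.pyGetD (x :: y :: t) (i + 1) 0 * 10 + PySem.List.pyGetD (x :: y :: t) j 0 > max_pair
              then PySem.List.pyGetD (x :: y :: t) (i + 1) 0 * 10 + PySem.List.pyGetD (x :: y :: t) j 0
              else max_pair) m
          = (PySem.List.pyRange (i + 1) ((y :: t).length : Int)).foldl
            (fun max_pair j =>
              if PySem.List.pyGetD (y :: t) i 0 * 10 + PySem.List.pyGetD (y :: t) j 0 > max_pair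
              then PySem.List.pyGetD (y :: t) i 0 * 10 + PySem.List.pyGetD (y :: t) j 0
              else max_pair) m := by
        intro m i hi
        have hi0 : 0 ≤ i := (PySem.List.mem_pyRange_one.mp hi).1
        rw [pvGetD_cons_succ x (y :: t) i hi0,
            show (((x :: y :: t).length : Nat) : Int) = ((y :: t).length : Int) + 1 by push_cast [List.length_cons]; ring,
            pvShift (i + 1) ((y :: t).length : Int), List.foldl_map]
        apply PySem.List.foldl_congr_mem
        intro m' j hj
        have hj0 : 0 ≤ j := by have := (PySem.List.mem_pyRange_one.mp hj).1; omega
        rw [pvGetD_cons_succ x (y :: t) j hj0]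
      rw [PySem.List.foldl_congr_mem _ _ _ _ hcongr]
      have hinit : (PySem.List.pyRange (0 + 1) ((x :: y :: t).length : Int)).foldl
            (fun max_pair j =>
              if PySem.List.pyGetD (x :: y :: t) 0 0 * 10 + PySem.List.pyGetD (x :: y :: t) j 0 > max_pair
              then PySem.List.pyGetD (x :: y :: t) 0 0 * 10 + PySem.List.pyGetD (x :: y :: t) j 0
              else max_pair) acc = pvRow x (y :: t) acc := by
        simp only [PySem.List.pyGetD_zero_cons]
        rw [PySem.List.foldl_pyRange_pyGetD' (x :: y :: t) 0
              (fun m v => if x * 10 + v > m then x * 10 + v else m) acc (by norm_num)]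
        rfl
      rw [hinit]
      exact ih (pvRow x (y :: t) acc)

-- ===== VERDICT (by name: the statement is the Claim_ definition above) =====
theorem find_max_pair_spec : Claim_equal_find_max_pair := by
  intro line _
  show find_max_pair line = find_max_pair_alt line
  have hA : find_max_pair line = pvGo line 0 := pvOuter line 0
  have hB : find_max_pair_alt line = pvGo line 0 := by
    show (line.reverse.foldl pvStep ((0 : Int), (none : Option Int))).1 = _
    rw [pvB_state]
  rw [hA, hB]
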